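-- pv_equiv track=rewrite | github.com/SupKairo/a_maze_ing | mazegen/maze_display.py | path_to_cells
-- ===== SOURCE A (Python) =====
-- from typing import Tuple, Optional, Set, List
--
-- def path_to_cells(
--                   entry: Tuple[int, int],
--                   path: str) -> Set[Tuple[int, int]]:
--     """Convert path string to set of cell coordinates."""
--     x, y = entry
--     cells: Set[Tuple[int, int]] = {(x, y)}
--
--     for move in path:
--         if move == "N":
--             y -= 1
--         elif move == "S":
--             y += 1
--         elif move == "E":
--             x += 1
--         elif move == "W":
--             x -= 1
--         cells.add((x, y))
--
--     return cells
-- ===== SOURCE B (Python) =====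
-- from typing import Tuple, Set
--
-- def path_to_cells(entry: Tuple[int, int], path: str) -> Set[Tuple[int, int]]:
--     """Convert path string to set of cell coordinates (divide and conquer)."""
--     if len(path) == 0:
--         return {entry}
--     if len(path) == 1:
--         dx, dy = {"N": (0, -1), "S": (0, 1), "E": (1, 0), "W": (-1, 0)}.get(path, (0, 0))
--         return {entry, (entry[0] + dx, entry[1] + dy)}
--     mid = len(path) // 2
--     left, right = path[:mid], path[mid:]
--     # endpoint of the left half in closed form, from move counts
--     mid_pos = (entry[0] + left.count("E") - left.count("W"),
--                entry[1] + left.count("S") - left.count("N"))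
--     return path_to_cells(entry, left) | path_to_cells(mid_pos, right)
-- ===== Notes on version B (the rewrite author's own statement) =====
-- stated objective: alternative
-- what changed: Replaces A's single fused left-to-right update-and-insert loop by a divide-and-conquer recursion: split the path in half, compute the entry of the right half in closed form from the move counts of the left half, recurse on both halves and union the two cell sets.
import Mathlib
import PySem

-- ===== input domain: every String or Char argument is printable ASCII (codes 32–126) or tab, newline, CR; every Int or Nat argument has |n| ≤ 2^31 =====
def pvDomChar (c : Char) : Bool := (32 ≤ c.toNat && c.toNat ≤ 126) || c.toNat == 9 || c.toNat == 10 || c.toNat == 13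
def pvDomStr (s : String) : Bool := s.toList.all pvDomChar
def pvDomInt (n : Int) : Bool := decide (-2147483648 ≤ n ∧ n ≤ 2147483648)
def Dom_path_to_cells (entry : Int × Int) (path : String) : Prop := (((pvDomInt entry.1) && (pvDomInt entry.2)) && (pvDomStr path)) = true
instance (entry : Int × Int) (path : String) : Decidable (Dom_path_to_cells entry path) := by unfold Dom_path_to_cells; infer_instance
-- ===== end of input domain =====

-- B replaces A's fused left-to-right update-and-insert loop by a divide-and-conquer
-- recursion: halve the path, get the right half's entry in closed form from move counts,
-- recurse and union (alternative decomposition, not claimed faster).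

-- ===== PORT A =====
-- one iteration of A's loop: update (x, y) by the move, add the new cell to the set
def pathToCellsStep (st : (Int × Int) × PySem.Set (Int × Int)) (move : Char) :
    (Int × Int) × PySem.Set (Int × Int) :=
  let x := st.1.1
  let y := st.1.2
  let xy :=
    if move == 'N' then (x, y - 1)
    else if move == 'S' then (x, y + 1)
    else if move == 'E' then (x + 1, y)
    else if move == 'W' then (x - 1, y)
    else (x, y)
  (xy, PySem.Set.add st.2 xy)

def path_to_cells (entry : Int × Int) (path : String) : List (Int × Int) :=
  (path.toList.foldl pathToCellsStep (entry, PySem.Set.ofList [entry])).2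

-- ===== PORT B =====
-- the delta dict Source B builds for a single-character path: {"N": …}.get(path, (0, 0))
def pvDelta (c : Char) : Int × Int :=
  PySem.Dict.getD
    (PySem.Dict.ofList [('N', (0, -1)), ('S', (0, 1)), ('E', (1, 0)), ('W', (-1, 0))])
    c (0, 0)

-- Source B's recursion, over the character list; path[:mid]/path[mid:] = take/drop,
-- str.count of a single character = List.count (exact for one-char needles)
def pvCellsRec : (Int × Int) → List Char → PySem.Set (Int × Int)
  | entry, [] => PySem.Set.ofList [entry]
  | entry, [c] =>
      let d := pvDelta c
      PySem.Set.ofList [entry, (entry.1 + d.1, entry.2 + d.2)]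
  | entry, l@(_ :: _ :: _) =>
      let mid := l.length / 2
      let left := l.take mid
      let right := l.drop mid
      let midPos := (entry.1 + (left.count 'E' : Int) - (left.count 'W' : Int),
                     entry.2 + (left.count 'S' : Int) - (left.count 'N' : Int))
      PySem.Set.union (pvCellsRec entry left) (pvCellsRec midPos right)
termination_by _ l => l.length
decreasing_by
  · rename_i h; subst h; rw [List.length_take]; simp; omega
  · rename_i h; subst h; rw [List.length_drop]; simp; omega

def path_to_cells_alt (entry : Int × Int) (path : String) : List (Int × Int) :=
  pvCellsRec entry path.toList

-- ===== PRECONDITION & SPEC =====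
def Spec_path_to_cells (entry : Int × Int) (path : String) (out : List (Int × Int)) : Prop := out = path_to_cells_alt entry path
instance (entry : Int × Int) (path : String) (out : List (Int × Int)) : Decidable (Spec_path_to_cells entry path out) := by unfold Spec_path_to_cells; infer_instance

-- ===== CLAIM (what is proved, stated in full; the proofs are below) =====
def Claim_equal_path_to_cells : Prop := ∀ (entry : Int × Int) (path : String), Dom_path_to_cells entry path → Spec_path_to_cells entry path (path_to_cells entry path)

-- ===== LEMMAS AND PROOFS =====

-- the sequence of positions visited from p along l (including p)
def pvVisits (p : Int × Int) : List Char → List (Int × Int)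
  | [] => [p]
  | c :: l => p :: pvVisits (p.1 + (pvDelta c).1, p.2 + (pvDelta c).2) l

lemma pvDelta_eq (c : Char) :
    pvDelta c =
      (if c == 'N' then ((0 : Int), (-1 : Int))
       else if c == 'S' then (0, 1)
       else if c == 'E' then (1, 0)
       else if c == 'W' then (-1, 0)
       else (0, 0)) := by
  have hmk : PySem.Dict.ofList [('N', ((0:Int), (-1:Int))), ('S', (0, 1)), ('E', (1, 0)), ('W', (-1, 0))] =
      PySem.Dict.mk [('N', (0, -1)), ('S', (0, 1)), ('E', (1, 0)), ('W', (-1, 0))] := by decide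
  simp only [pvDelta, hmk, PySem.Dict.getD]
  simp [PySem.Dict.get?_mk_cons]
  split_ifs <;> simp_all [PySem.Dict.get?, eq_comm]

-- the position A's branch chain produces equals the old position plus B's delta
lemma pathToCellsStep_pos (p : Int × Int) (s : PySem.Set (Int × Int)) (c : Char) :
    (pathToCellsStep (p, s) c).1 = (p.1 + (pvDelta c).1, p.2 + (pvDelta c).2) := by
  simp only [pathToCellsStep, pvDelta_eq]
  split_ifs <;> simp <;> ring

-- A's loop collects exactly the visit sequence into the set
lemma foldl_step_eq (l : List Char) (p : Int × Int) (s : PySem.Set (Int × Int)) :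
    (l.foldl pathToCellsStep (p, PySem.Set.add s p)).2 =
      (pvVisits p l).foldl PySem.Set.add s := by
  induction l generalizing p s with
  | nil => simp [pvVisits]
  | cons c l ih =>
      have hpos := pathToCellsStep_pos p (PySem.Set.add s p) c
      simp only [List.foldl_cons, pvVisits]
      have hstep : pathToCellsStep (p, PySem.Set.add s p) c =
          ((pathToCellsStep (p, PySem.Set.add s p) c).1,
           PySem.Set.add (PySem.Set.add s p)
             (pathToCellsStep (p, PySem.Set.add s p) c).1) := by
        simp only [pathToCellsStep]
      rw [hstep, hpos, ih]

-- endpoint of a walk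
def pvEnd (p : Int × Int) : List Char → Int × Int
  | [] => p
  | c :: l => pvEnd (p.1 + (pvDelta c).1, p.2 + (pvDelta c).2) l

lemma pvVisits_ne_nil (p : Int × Int) (l : List Char) : pvVisits p l ≠ [] := by
  cases l <;> simp [pvVisits]

lemma pvVisits_append (p : Int × Int) (l₁ l₂ : List Char) :
    pvVisits p (l₁ ++ l₂) = (pvVisits p l₁).dropLast ++ pvVisits (pvEnd p l₁) l₂ := by
  induction l₁ generalizing p with
  | nil => simp [pvVisits, pvEnd]
  | cons c l₁ ih =>
      simp only [List.cons_append, pvVisits, pvEnd, ih]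
      rw [List.dropLast_cons_of_ne_nil (pvVisits_ne_nil _ _)]
      simp

lemma pvVisits_eq_dropLast (p : Int × Int) (l : List Char) :
    pvVisits p l = (pvVisits p l).dropLast ++ [pvEnd p l] := by
  induction l generalizing p with
  | nil => simp [pvVisits, pvEnd]
  | cons c l ih =>
      simp only [pvVisits, pvEnd]
      rw [List.dropLast_cons_of_ne_nil (pvVisits_ne_nil _ _)]
      simp only [List.cons_append]
      exact congrArg _ (ih _)

-- the endpoint in closed form, from the move counts (Source B's mid_pos formula)
lemma pvEnd_counts (p : Int × Int) (l : List Char) :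
    pvEnd p l = (p.1 + (l.count 'E' : Int) - (l.count 'W' : Int),
                 p.2 + (l.count 'S' : Int) - (l.count 'N' : Int)) := by
  induction l generalizing p with
  | nil => simp [pvEnd]
  | cons c l ih =>
      simp only [pvEnd, ih, List.count_cons, pvDelta_eq]
      split_ifs <;> simp_all [Prod.ext_iff] <;> omega

-- membership is preserved by folding add
lemma mem_foldl_add_self (u : List (Int × Int)) (s : PySem.Set (Int × Int))
    (x : Int × Int) (hx : x ∈ s) : x ∈ u.foldl PySem.Set.add s := by
  induction u generalizing s with
  | nil => exact hx
  | cons a u ih => exact ih _ (by simp [PySem.Set.mem_add, hx])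

lemma mem_foldl_add_of_mem (u : List (Int × Int)) (s : PySem.Set (Int × Int))
    (x : Int × Int) (hx : x ∈ u) : x ∈ u.foldl PySem.Set.add s := by
  induction u generalizing s with
  | nil => cases hx
  | cons a u ih =>
      rcases List.mem_cons.mp hx with h | h
      · exact mem_foldl_add_self u _ _ (by simp [PySem.Set.mem_add, h])
      · exact ih _ h

-- folding add over a list containing x already absorbs a later x
lemma foldl_add_absorb (u v : List (Int × Int)) (x : Int × Int)
    (s : PySem.Set (Int × Int)) (hx : x ∈ u) :
    (u ++ x :: v).foldl PySem.Set.add s = (u ++ v).foldl PySem.Set.add s := by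
  rw [List.foldl_append, List.foldl_append, List.foldl_cons,
      PySem.Set.add_of_mem (mem_foldl_add_of_mem u s x hx)]

-- B's recursion also collects exactly the visit sequence
lemma pvCellsRec_eq (l : List Char) (p : Int × Int) :
    pvCellsRec p l = PySem.Set.ofList (pvVisits p l) := by
  induction hn : l.length using Nat.strong_induction_on generalizing l p with
  | _ n ih =>
  match l with
  | [] => simp [pvCellsRec, pvVisits]
  | [c] => simp [pvCellsRec, pvVisits]
  | c₁ :: c₂ :: t =>
      rw [pvCellsRec]
      have hlen : (c₁ :: c₂ :: t).length = n := hn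
      have hmid : 1 ≤ (c₁ :: c₂ :: t).length / 2 ∧ (c₁ :: c₂ :: t).length / 2 < (c₁ :: c₂ :: t).length := by
        simp; omega
      set L := c₁ :: c₂ :: t with hL
      set m := L.length / 2 with hm
      have h1 : (L.take m).length < n := by
        rw [List.length_take]; omega
      have h2 : (L.drop m).length < n := by
        rw [List.length_drop]; omega
      rw [ih _ h1 _ _ rfl, ih _ h2 _ _ rfl]
      have hsplit : L = L.take m ++ L.drop m := (List.take_append_drop m L).symm
      have hmidpos :
          ((p.1 + ((L.take m).count 'E' : Int) - ((L.take m).count 'W' : Int),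
            p.2 + ((L.take m).count 'S' : Int) - ((L.take m).count 'N' : Int)) : Int × Int)
          = pvEnd p (L.take m) := (pvEnd_counts p (L.take m)).symm
      rw [hmidpos]
      -- union (ofList u) (ofList v) = ofList (u ++ v) modulo dedup of head of v
      rw [show PySem.Set.union = fun (s t : PySem.Set (Int × Int)) => PySem.Set.update s t from rfl]
      simp only
      rw [PySem.Set.update_eq_append_filter, PySem.Set.ofList_ofList,
          ← PySem.Set.update_eq_append_filter, ← PySem.Set.ofList_append]
      -- now: ofList (visits p left ++ visits (end) right) = ofList (visits p (left++right))
      conv_rhs => rw [hsplit, pvVisits_append]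
      rw [PySem.Set.ofList, PySem.Set.ofList]
      conv_lhs => rw [pvVisits_eq_dropLast p (L.take m), List.append_assoc]
      simp only [List.singleton_append]
      cases hv : pvVisits (pvEnd p (L.take m)) (L.drop m) with
      | nil => exact absurd hv (pvVisits_ne_nil _ _)
      | cons q v =>
          have hq : q = pvEnd p (L.take m) := by
            cases hd : L.drop m <;> simp [hd, pvVisits] at hv <;> exact hv.1.symm
          rw [hq]
          have habs := foldl_add_absorb
            ((pvVisits p (L.take m)).dropLast ++ [pvEnd p (L.take m)]) v
            (pvEnd p (L.take m)) PySem.Set.empty (by simp)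
          rw [List.append_assoc, List.singleton_append,
              List.append_assoc, List.singleton_append] at habs
          exact habs

-- ===== VERDICT (by name: the statement is the Claim_ definition above) =====
theorem path_to_cells_spec : Claim_equal_path_to_cells := by
  intro entry path _
  show path_to_cells entry path = path_to_cells_alt entry path
  have h := foldl_step_eq path.toList entry PySem.Set.empty
  simp only [path_to_cells, path_to_cells_alt, pvCellsRec_eq]
  rw [PySem.Set.ofList_eq_foldl]
  simpa [PySem.Set.empty, PySem.Set.ofList] using h
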